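-- pv_equiv track=rewrite | github.com/ryu577/daily | 2401/240126.py | g1
-- ===== SOURCE A (Python) =====
-- def g1(start, end, v, t):
--     if t % 2 == 0:
--         x = (2*end+3*start)//5
--     else:
--         x = (3*end+2*start)//5
--     if x == v:
--         return t+1
--     elif v < x:
--         return g1(start, x-1, v, t+1)
--     else:
--         return g1(x+1, end, v, t+1)
-- ===== SOURCE B (Python) =====
-- def g1(start, end, v, t):
--     while start <= end:
--         x = (2*end + 3*start) // 5 if t % 2 == 0 else (3*end + 2*start) // 5
--         if x == v:
--             return t + 1
--         if v < x:
--             end = x - 1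
--         else:
--             start = x + 1
--         t += 1
--     raise ValueError("v not in range")
-- ===== Notes on version B (the rewrite author's own statement) =====
-- stated objective: alternative
-- what changed: Replaced A's unbounded tail recursion (one stack frame per probe) with the canonical iterative loop over the shrinking interval: while start <= end update start/end/t in place, raising ValueError when the interval empties instead of recursing past it.
-- outside the precondition, e.g. on g1(-6, -6, -8, 0): A returns 4, B raises ValueError; on g1(10, 5, 7, 9): A returns 10, B raises ValueError; on g1(5, 1, 0, -1): A raises RecursionError, B raises ValueError
import Mathlib
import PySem

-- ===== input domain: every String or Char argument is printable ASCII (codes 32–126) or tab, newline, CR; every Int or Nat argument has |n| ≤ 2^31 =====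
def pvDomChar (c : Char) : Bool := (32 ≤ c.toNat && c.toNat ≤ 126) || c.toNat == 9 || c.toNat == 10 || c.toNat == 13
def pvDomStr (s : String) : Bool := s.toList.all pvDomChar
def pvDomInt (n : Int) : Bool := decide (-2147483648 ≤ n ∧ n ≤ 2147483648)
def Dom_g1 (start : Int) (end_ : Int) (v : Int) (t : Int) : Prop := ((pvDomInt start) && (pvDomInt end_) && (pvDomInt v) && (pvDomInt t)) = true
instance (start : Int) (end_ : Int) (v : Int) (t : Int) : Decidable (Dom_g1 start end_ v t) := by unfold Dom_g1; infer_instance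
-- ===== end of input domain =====

-- B replaces A's unbounded tail recursion with the canonical iterative loop over the shrinking interval; where the interval empties B raises ValueError (outside Pre_) instead of recursing on.


-- ===== PORT A =====
-- A's recursion; fuel only makes the recursion total, it is never exhausted inside Pre_g1.
def g1Rec (fuel : Nat) (start : Int) (end_ : Int) (v : Int) (t : Int) : Int :=
  match fuel with
  | 0 => 0
  | fuel + 1 =>
    let x := if PySem.Int.mod t 2 = 0 then PySem.Int.floordiv (2*end_ + 3*start) 5
             else PySem.Int.floordiv (3*end_ + 2*start) 5
    if x = v then t + 1
    else if v < x then g1Rec fuel start (x - 1) v (t + 1)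
    else g1Rec fuel (x + 1) end_ v (t + 1)

def g1 (start : Int) (end_ : Int) (v : Int) (t : Int) : Int :=
  g1Rec (end_ - start + 1).toNat start end_ v t

-- ===== PORT B =====
-- B's while loop: state (start, end, t); the while-condition start ≤ end is the loop guard,
-- none = the loop exited without finding v (Python raises ValueError); fuel only makes it total
-- (the interval shrinks each iteration, so fuel (end-start+1) is never exhausted before exit).
def g1Loop (v : Int) : Nat → Int × Int × Int → Option Int
  | 0, _ => none
  | n + 1, (s, e, t) =>
    if s ≤ e then
      let x := if PySem.Int.mod t 2 = 0 then PySem.Int.floordiv (2*e + 3*s) 5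
               else PySem.Int.floordiv (3*e + 2*s) 5
      if x = v then some (t + 1)
      else g1Loop v n (if v < x then (s, x - 1, t + 1) else (x + 1, e, t + 1))
    else none

def g1_alt (start : Int) (end_ : Int) (v : Int) (t : Int) : Int :=
  (g1Loop v (end_ - start + 1).toNat (start, end_, t)).getD 0

-- ===== PRECONDITION & SPEC =====
-- Pre_g1 excludes v outside [start, end]: there A keeps recursing past the empty interval,
-- usually overflowing the recursion limit (RecursionError), though its degenerate walk can
-- still hit v and return an accidental value (see cites); B's loop stops when the interval
-- empties and raises ValueError on all such inputs.
def Pre_g1 (start : Int) (end_ : Int) (v : Int) (t : Int) : Prop := start ≤ v ∧ v ≤ end_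
instance (start : Int) (end_ : Int) (v : Int) (t : Int) : Decidable (Pre_g1 start end_ v t) := by unfold Pre_g1; infer_instance
def pvWitness_g1 : Int × Int × Int × Int := (0, 10, 7, 0)
def Spec_g1 (start : Int) (end_ : Int) (v : Int) (t : Int) (out : Int) : Prop := out = g1_alt start end_ v t
instance (start : Int) (end_ : Int) (v : Int) (t : Int) (out : Int) : Decidable (Spec_g1 start end_ v t out) := by unfold Spec_g1; infer_instance

-- ===== CLAIM (what is proved, stated in full; the proofs are below) =====
def Claim_equal_g1 : Prop := ∀ (start : Int) (end_ : Int) (v : Int) (t : Int), Dom_g1 start end_ v t → Pre_g1 start end_ v t → Spec_g1 start end_ v t (g1 start end_ v t)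

-- ===== LEMMAS AND PROOFS =====
-- Invariant: while s ≤ v ≤ e, A's recursion and B's loop probe the same x and keep v inside
-- the interval, so with equal fuel they produce the same value (B's guard s ≤ e never fails).
theorem g1Rec_eq_loop (v : Int) (n : Nat) : ∀ (s e t : Int), s ≤ v → v ≤ e →
    g1Rec n s e v t = (g1Loop v n (s, e, t)).getD 0 := by
  induction n with
  | zero => intro s e t _ _; rfl
  | succ n ih =>
    intro s e t hsv hve
    have hse : s ≤ e := le_trans hsv hve
    simp only [g1Rec, g1Loop, if_pos hse]
    by_cases hm : PySem.Int.mod t 2 = 0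
    · simp only [if_pos hm]
      set x := PySem.Int.floordiv (2*e + 3*s) 5 with hx
      by_cases hxv : x = v
      · simp [hxv]
      · by_cases hvx : v < x
        · simpa [hxv, hvx] using ih s (x - 1) (t + 1) hsv (by omega)
        · simpa [hxv, hvx] using ih (x + 1) e (t + 1) (by omega) hve
    · simp only [if_neg hm]
      set x := PySem.Int.floordiv (3*e + 2*s) 5 with hx
      by_cases hxv : x = v
      · simp [hxv]
      · by_cases hvx : v < x
        · simpa [hxv, hvx] using ih s (x - 1) (t + 1) hsv (by omega)
        · simpa [hxv, hvx] using ih (x + 1) e (t + 1) (by omega) hve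

-- ===== VERDICT (by name: the statement is the Claim_ definition above) =====
theorem g1_spec : Claim_equal_g1 := by
  intro start end_ v t _ hpre
  unfold Spec_g1 g1 g1_alt
  exact g1Rec_eq_loop v _ start end_ t hpre.1 hpre.2
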